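-- pv_equiv track=rewrite | github.com/xfwwl668/qunity_v10 | src/data/columnar_adapter.py | _is_valid_a_stock
-- ===== SOURCE A (Python) =====
-- from typing import Any, Dict, List, Optional, Set, Tuple
--
-- _BLACKLIST_PREFIXES: Set[str] = {
--     "sh.000", "sh.399", "sz.399", "sh.880", "sz.880",
--     "sh.900", "sz.200", "bj.",
-- }
--
-- def _is_valid_a_stock(code: str) -> bool:
--     """
--     [DATA-1] 判断代码是否为有效 A 股标的。
--
--     格式要求：{sh|sz}.{6位数字}
--     白名单前缀：
--       sh: 600/601/603/605（主板）, 688（科创板）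
--       sz: 000/001/002/003（主板+中小板）, 300/301（创业板）
--     """
--     for prefix in _BLACKLIST_PREFIXES:
--         if code.startswith(prefix):
--             return False
--
--     parts = code.split(".")
--     if len(parts) != 2:
--         return False
--     exchange, num = parts[0], parts[1]
--     if exchange not in ("sh", "sz"):
--         return False
--     if not num.isdigit() or len(num) != 6:
--         return False
--
--     if exchange == "sh":
--         # 沪市A股：主板600/601/603/605，科创板688
--         return num.startswith(("600", "601", "603", "605", "688"))
--     if exchange == "sz":
--         # 深市A股：主板000/001，中小板002/003，创业板300/301
--         # 注意：399xxx为深证指数（如399001深证成指），必须排除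
--         return num.startswith(("000", "001", "002", "003", "300", "301"))
--     return False
-- ===== SOURCE B (Python) =====
-- VALID_PREFIXES = {
--     "sh.600", "sh.601", "sh.603", "sh.605", "sh.688",
--     "sz.000", "sz.001", "sz.002", "sz.003", "sz.300", "sz.301",
-- }
--
-- def _is_valid_a_stock(code: str) -> bool:
--     return len(code) == 9 and code[:6] in VALID_PREFIXES and code[6:].isdigit()
-- ===== Notes on version B (the rewrite author's own statement) =====
-- stated objective: simpler
-- what changed: Replaces the blacklist loop, the dot-split and the per-exchange startswith branches by a single expression: length 9, 6-char prefix in a precomputed set of the 11 valid exchange+board prefixes, digit tail.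
import Mathlib
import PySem

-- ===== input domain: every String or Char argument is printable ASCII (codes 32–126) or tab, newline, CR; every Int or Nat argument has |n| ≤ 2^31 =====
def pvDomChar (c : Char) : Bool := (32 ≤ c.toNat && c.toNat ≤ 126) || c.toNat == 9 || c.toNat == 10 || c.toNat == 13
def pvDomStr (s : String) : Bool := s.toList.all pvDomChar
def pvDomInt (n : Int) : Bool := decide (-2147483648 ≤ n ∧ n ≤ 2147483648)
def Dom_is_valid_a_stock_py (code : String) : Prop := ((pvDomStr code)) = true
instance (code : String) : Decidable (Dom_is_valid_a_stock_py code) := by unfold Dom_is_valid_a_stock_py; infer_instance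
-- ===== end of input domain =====

-- B replaces A's blacklist loop, dot-split and per-exchange branches by one table lookup
-- (length 9 ∧ 6-char prefix in a set of the 11 valid prefixes ∧ digit tail): simpler, same behaviour.


-- ===== PORT A =====
-- _BLACKLIST_PREFIXES (a Python set; the loop over it is order-independent, ported as `any`)
def pyBlacklistPrefixes : PySem.Set (List Char) :=
  PySem.Set.ofList ["sh.000".toList, "sh.399".toList, "sz.399".toList, "sh.880".toList,
                    "sz.880".toList, "sh.900".toList, "sz.200".toList, "bj.".toList]

def is_valid_a_stock_py (code : String) : Bool :=
  -- for prefix in _BLACKLIST_PREFIXES: if code.startswith(prefix): return False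
  if pyBlacklistPrefixes.any (fun p => PySem.Chars.startswith code.toList p) then false
  else
    -- parts = code.split("."); if len(parts) != 2: return False; exchange, num = parts
    match PySem.Chars.splitOn code.toList ['.'] with
    | [exchange, num] =>
      -- if exchange not in ("sh", "sz"): return False
      if !(exchange == "sh".toList || exchange == "sz".toList) then false
      -- if not num.isdigit() or len(num) != 6: return False
      else if !PySem.Chars.strIsdigit num || num.length != 6 then false
      -- if exchange == "sh": return num.startswith(("600","601","603","605","688"))
      else if exchange == "sh".toList then
        ["600".toList, "601".toList, "603".toList, "605".toList, "688".toList].any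
          (fun p => PySem.Chars.startswith num p)
      -- if exchange == "sz": return num.startswith(("000","001","002","003","300","301"))
      else if exchange == "sz".toList then
        ["000".toList, "001".toList, "002".toList, "003".toList, "300".toList, "301".toList].any
          (fun p => PySem.Chars.startswith num p)
      else false
    | _ => false

-- ===== PORT B =====
-- VALID_PREFIXES (module-level set in Source B)
def pyValidPrefixes : PySem.Set (List Char) :=
  PySem.Set.ofList ["sh.600".toList, "sh.601".toList, "sh.603".toList, "sh.605".toList,
                    "sh.688".toList, "sz.000".toList, "sz.001".toList, "sz.002".toList,
                    "sz.003".toList, "sz.300".toList, "sz.301".toList]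

def is_valid_a_stock_py_alt (code : String) : Bool :=
  -- len(code) == 9 and code[:6] in VALID_PREFIXES and code[6:].isdigit()
  (code.toList.length == 9)
    && PySem.Set.contains pyValidPrefixes (PySem.Chars.slice code.toList none (some 6))
    && PySem.Chars.strIsdigit (PySem.Chars.slice code.toList (some 6) none)

-- ===== PRECONDITION & SPEC =====
def Spec_is_valid_a_stock_py (code : String) (out : Bool) : Prop := out = is_valid_a_stock_py_alt code
instance (code : String) (out : Bool) : Decidable (Spec_is_valid_a_stock_py code out) := by unfold Spec_is_valid_a_stock_py; infer_instance

-- ===== CLAIM (what is proved, stated in full; the proofs are below) =====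
def Claim_equal_is_valid_a_stock_py : Prop := ∀ (code : String), Dom_is_valid_a_stock_py code → Spec_is_valid_a_stock_py code (is_valid_a_stock_py code)

-- ===== LEMMAS AND PROOFS =====

-- structural model of s.split(".") (PySem.Chars.splitOn with the one-char separator '.')
def consFst (p : List Char) : List (List Char) → List (List Char)
  | [] => [p]
  | q :: qs => (p ++ q) :: qs

def splitDot : List Char → List (List Char)
  | [] => [[]]
  | c :: r => if c = '.' then [] :: splitDot r else consFst [c] (splitDot r)

lemma splitDot_ne_nil (l : List Char) : splitDot l ≠ [] := by
  induction l with
  | nil => simp [splitDot]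
  | cons c r ih =>
    simp only [splitDot]
    split
    · simp
    · cases h : splitDot r <;> simp [consFst]

lemma consFst_consFst (a b : List Char) (x : List (List Char)) :
    consFst a (consFst b x) = consFst (a ++ b) x := by
  cases x <;> simp [consFst]

lemma consFst_nil_of_ne_nil (x : List (List Char)) (h : x ≠ []) : consFst [] x = x := by
  cases x with
  | nil => exact absurd rfl h
  | cons q qs => simp [consFst]

lemma go_dot (fuel : Nat) : ∀ (l cur : List Char) (acc : List (List Char)), l.length ≤ fuel →
    PySem.Chars.splitOn.go ['.'] fuel l cur acc = acc.reverse ++ consFst cur.reverse (splitDot l) := by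
  induction fuel with
  | zero =>
    intro l cur acc h
    have : l = [] := List.length_eq_zero_iff.mp (Nat.le_zero.mp h)
    subst this
    simp [PySem.Chars.splitOn.go, splitDot, consFst]
  | succ n ih =>
    intro l cur acc h
    cases l with
    | nil => simp [PySem.Chars.splitOn.go, splitDot, consFst]
    | cons c rest =>
      simp only [PySem.Chars.splitOn.go]
      by_cases hc : c = '.'
      · subst hc
        have hpre : List.isPrefixOf ['.'] ('.' :: rest) = true := by simp [List.isPrefixOf]
        rw [if_pos hpre]
        have hlen : rest.length ≤ n := by simpa using Nat.le_of_succ_le_succ h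
        rw [ih _ _ _ (by simpa using hlen)]
        show (cur.reverse :: acc).reverse ++ consFst [] (splitDot rest) = _
        rw [consFst_nil_of_ne_nil _ (splitDot_ne_nil rest)]
        simp [splitDot, consFst]
      · have hpre : List.isPrefixOf ['.'] (c :: rest) = false := by
          simp [List.isPrefixOf, Ne.symm hc]
        rw [if_neg (by simp [hpre])]
        have hlen : rest.length ≤ n := Nat.le_of_succ_le_succ (by simpa using h)
        rw [ih rest (c :: cur) acc hlen]
        simp [splitDot, hc, consFst_consFst]

lemma splitOn_dot (l : List Char) : PySem.Chars.splitOn l ['.'] = splitDot l := by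
  unfold PySem.Chars.splitOn
  rw [go_dot (l.length + 1) l [] [] (Nat.le_succ _)]
  simp [consFst_nil_of_ne_nil _ (splitDot_ne_nil l)]

lemma splitDot_one (l n : List Char) (h : splitDot l = [n]) : l = n := by
  induction l generalizing n with
  | nil =>
    simp only [splitDot, List.cons.injEq] at h
    exact h.1.symm ▸ rfl
  | cons c r ih =>
    simp only [splitDot] at h
    split at h
    · simp only [List.cons.injEq] at h
      exact absurd h.2 (splitDot_ne_nil r)
    · rcases hq : splitDot r with _ | ⟨q, qs⟩
      · exact absurd hq (splitDot_ne_nil r)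
      · rw [hq] at h
        simp only [consFst, List.cons.injEq] at h
        obtain ⟨h1, h2⟩ := h
        have : r = q := ih q (by rw [hq, h2])
        simp [← h1, this]

lemma splitDot_two (l e n : List Char) (h : splitDot l = [e, n]) : l = e ++ '.' :: n := by
  induction l generalizing e n with
  | nil => simp [splitDot] at h
  | cons c r ih =>
    simp only [splitDot] at h
    split at h
    · rename_i hc
      subst hc
      simp only [List.cons.injEq] at h
      obtain ⟨h1, h2⟩ := h
      rw [← h1, splitDot_one r n h2]
      rfl
    · rename_i hc
      rcases hq : splitDot r with _ | ⟨q, qs⟩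
      · exact absurd hq (splitDot_ne_nil r)
      · rw [hq] at h
        simp only [consFst, List.cons.injEq] at h
        obtain ⟨h1, h2⟩ := h
        have hr : splitDot r = [q, n] := by rw [hq, h2]
        have := ih q n hr
        simp [← h1, this]

lemma isdigit_ne_dot {c : Char} (h : PySem.Chars.isdigit c = true) : ¬ c = '.' := by
  intro hc
  subst hc
  simp [PySem.Chars.isdigit] at h

-- B returns true on every string of the shape  (valid 6-char prefix) ++ three digits
lemma alt_of_shape (code : String) (p : List Char) (d4 d5 d6 : Char)
    (hp : p ∈ pyValidPrefixes) (hp6 : p.length = 6)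
    (hl : code.toList = p ++ [d4, d5, d6])
    (h4 : PySem.Chars.isdigit d4 = true) (h5 : PySem.Chars.isdigit d5 = true)
    (h6 : PySem.Chars.isdigit d6 = true) :
    is_valid_a_stock_py_alt code = true := by
  have ht : (p ++ [d4, d5, d6]).take 6 = p := by rw [← hp6]; exact List.take_left
  have hd : (p ++ [d4, d5, d6]).drop 6 = [d4, d5, d6] := by rw [← hp6]; exact List.drop_left
  simp [is_valid_a_stock_py_alt, PySem.Chars.slice_eq_listSlice,
    PySem.List.slice_to _ (by norm_num : (0 : Int) ≤ 6),
    PySem.List.slice_from _ (by norm_num : (0 : Int) ≤ 6),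
    hl, ht, hd, hp6, PySem.Chars.strIsdigit, h4, h5, h6, hp]

-- common step of A → B: one whitelisted branch of A forces the shape B tests for
lemma a_case (code : String) (ex q nn : List Char)
    (hsp : splitDot code.toList = [ex, nn])
    (hdig : PySem.Chars.strIsdigit nn = true) (hlen : nn.length = 6)
    (hpre : PySem.Chars.startswith nn q = true) (hq3 : q.length = 3) (hex2 : ex.length = 2)
    (hmem : (ex ++ '.' :: q) ∈ pyValidPrefixes) :
    is_valid_a_stock_py_alt code = true := by
  obtain ⟨t, hnt⟩ : q <+: nn := by
    simpa [PySem.Chars.startswith, List.isPrefixOf_iff_prefix] using hpre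
  have ht3 : t.length = 3 := by
    have := congrArg List.length hnt
    simp [hq3] at this
    omega
  obtain ⟨d4, d5, d6, hts⟩ := List.length_eq_three.mp ht3
  subst hts
  have hnn : nn = q ++ [d4, d5, d6] := hnt.symm
  have hdigs : PySem.Chars.isdigit d4 = true ∧ PySem.Chars.isdigit d5 = true ∧
      PySem.Chars.isdigit d6 = true := by
    rw [hnn] at hdig
    simp [PySem.Chars.strIsdigit] at hdig
    exact ⟨hdig.2.1, hdig.2.2.1, hdig.2.2.2⟩
  have hl : code.toList = (ex ++ '.' :: q) ++ [d4, d5, d6] := by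
    rw [splitDot_two code.toList ex nn hsp, hnn]
    simp
  exact alt_of_shape code (ex ++ '.' :: q) d4 d5 d6 hmem
    (by simp [hex2, hq3]) hl hdigs.1 hdigs.2.1 hdigs.2.2

-- A = true → B = true
lemma a_imp_b (code : String) (h : is_valid_a_stock_py code = true) :
    is_valid_a_stock_py_alt code = true := by
  simp only [is_valid_a_stock_py] at h
  split at h
  · exact absurd h (by simp)
  rw [splitOn_dot] at h
  rcases hsp : splitDot code.toList with _ | ⟨e, _ | ⟨nn, _ | ⟨x, xs⟩⟩⟩ <;> rw [hsp] at h
  · exact absurd h (by simp)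
  · exact absurd h (by simp)
  case cons.cons.cons => exact absurd h (by simp)
  -- exactly two parts
  dsimp only at h
  split_ifs at h with hb1 hb2 hb3 hb4
  · -- exchange == "sh"
    have he : e = "sh".toList := by simpa using hb3
    have hnum : PySem.Chars.strIsdigit nn = true ∧ nn.length = 6 := by
      simp only [Bool.or_eq_true, Bool.not_eq_eq_eq_not, Bool.not_true] at hb2
      constructor
      · by_contra hc
        exact hb2 (Or.inl (by simpa using hc))
      · by_contra hc
        exact hb2 (Or.inr (by simpa using hc))
    simp only [List.any_cons, List.any_nil, Bool.or_eq_true, Bool.or_false] at h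
    subst he
    rcases h with h | h | h | h | h <;>
      exact a_case code _ _ nn hsp hnum.1 hnum.2 h (by decide) (by decide) (by decide)
  · -- exchange == "sz"
    have he : e = "sz".toList := by simpa using hb4
    have hnum : PySem.Chars.strIsdigit nn = true ∧ nn.length = 6 := by
      simp only [Bool.or_eq_true, Bool.not_eq_eq_eq_not, Bool.not_true] at hb2
      constructor
      · by_contra hc
        exact hb2 (Or.inl (by simpa using hc))
      · by_contra hc
        exact hb2 (Or.inr (by simpa using hc))
    simp only [List.any_cons, List.any_nil, Bool.or_eq_true, Bool.or_false] at h
    subst he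
    rcases h with h | h | h | h | h | h <;>
      exact a_case code _ _ nn hsp hnum.1 hnum.2 h (by decide) (by decide) (by decide)

-- B = true → A = true
lemma b_imp_a (code : String) (h : is_valid_a_stock_py_alt code = true) :
    is_valid_a_stock_py code = true := by
  simp only [is_valid_a_stock_py_alt, PySem.Chars.slice_eq_listSlice,
    PySem.List.slice_to _ (by norm_num : (0 : Int) ≤ 6),
    PySem.List.slice_from _ (by norm_num : (0 : Int) ≤ 6),
    Bool.and_eq_true, beq_iff_eq] at h
  obtain ⟨⟨h1, h2⟩, h3⟩ := h
  simp only [show (6 : Int).toNat = 6 from rfl] at h2 h3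
  have hdl : (code.toList.drop 6).length = 3 := by simp [h1]
  obtain ⟨d4, d5, d6, hd⟩ := List.length_eq_three.mp hdl
  rw [hd] at h3
  simp only [PySem.Chars.strIsdigit, List.all_cons, List.all_nil, Bool.and_eq_true,
    List.isEmpty_cons, Bool.not_false, true_and] at h3
  have h4 := h3.1
  have h5 := h3.2.1
  have h6 := h3.2.2.1
  have hn4 := isdigit_ne_dot h4
  have hn5 := isdigit_ne_dot h5
  have hn6 := isdigit_ne_dot h6
  have hl : code.toList = code.toList.take 6 ++ [d4, d5, d6] := by
    rw [← hd, List.take_append_drop]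
  have hmem : code.toList.take 6 ∈ pyValidPrefixes := by
    simpa using h2
  have hmem' : code.toList.take 6 ∈ ["sh.600".toList, "sh.601".toList, "sh.603".toList,
      "sh.605".toList, "sh.688".toList, "sz.000".toList, "sz.001".toList, "sz.002".toList,
      "sz.003".toList, "sz.300".toList, "sz.301".toList] := by
    simpa [pyValidPrefixes, PySem.Set.ofList] using hmem
  simp only [List.mem_cons, List.not_mem_nil, or_false] at hmem'
  rcases hmem' with hp | hp | hp | hp | hp | hp | hp | hp | hp | hp | hp <;>
    (rw [hp] at hl
     simp [is_valid_a_stock_py, hl, splitOn_dot, pyBlacklistPrefixes, PySem.Set.ofList,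
       PySem.Chars.startswith, List.isPrefixOf, splitDot, consFst, hn4, hn5, hn6,
       PySem.Chars.strIsdigit, h4, h5, h6]
     all_goals decide)

-- ===== VERDICT (by name: the statement is the Claim_ definition above) =====
theorem is_valid_a_stock_py_spec : Claim_equal_is_valid_a_stock_py := by
  intro code _
  unfold Spec_is_valid_a_stock_py
  cases hA : is_valid_a_stock_py code with
  | true => exact (a_imp_b code hA).symm
  | false =>
    cases hB : is_valid_a_stock_py_alt code with
    | false => rfl
    | true => exact absurd (b_imp_a code hB) (by simp [hA])
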